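-- pv_equiv track=rewrite | github.com/mcraig10/StorageCode | DemandFuncsCE.py | getHoursInMonths
-- ===== SOURCE A (Python) =====
-- def getHoursInMonths(months):
--     daysPerMonth = [(1,31),(2,28),(3,31),(4,30),(5,31),(6,30),(7,31),(8,31),(9,30),(10,31),(11,30),(12,31)]
--     firstDayInMonthsAsDayInYear = getFirstDayInMonthsAsDayInYear(daysPerMonth)
--     daysInMonths = []
--     for month in months:
--         firstDayInMonth = firstDayInMonthsAsDayInYear[month-1]
--         daysInMonth = [day for day in range(firstDayInMonth,firstDayInMonth+daysPerMonth[month-1][1])]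
--         daysInMonths.extend(daysInMonth)
--     hoursInMonths = []
--     for day in daysInMonths: hoursInMonths.extend([val+1 for val in range(day*24,(day+1)*24)])
--     return hoursInMonths #starts @ 1
--
-- def getFirstDayInMonthsAsDayInYear(daysPerMonth):
--     firstDayInMonthsAsDayInYear = []
--     for idx in range(len(daysPerMonth)):
--         if idx == 0:
--             firstDayInMonthsAsDayInYear.append(0)
--         else:
--             firstDayInMonthsAsDayInYear.append(firstDayInMonthsAsDayInYear[idx-1]+daysPriorMonth)
--         (lastMonth,daysPriorMonth) = (daysPerMonth[idx][0],daysPerMonth[idx][1])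
--     return firstDayInMonthsAsDayInYear #starts at 0
-- ===== SOURCE B (Python) =====
-- def getHoursInMonths(months):
--     days = [31, 28, 31, 30, 31, 30, 31, 31, 30, 31, 30, 31]
--     starts = []
--     s = 0
--     for d in days:
--         starts.append(s)
--         s += d
--     hours = []
--     for m in months:
--         first = starts[m - 1]
--         hours.extend(range(first * 24 + 1, (first + days[m - 1]) * 24 + 1))
--     return hours
-- ===== Notes on version B (the rewrite author's own statement) =====
-- stated objective: simpler
-- what changed: B precomputes month start-days by one running sum and emits each month's hours as a single contiguous range(first*24+1, (first+days)*24+1), dropping A's intermediate day list and the per-day 24-hour expansion loop.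
import Mathlib
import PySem

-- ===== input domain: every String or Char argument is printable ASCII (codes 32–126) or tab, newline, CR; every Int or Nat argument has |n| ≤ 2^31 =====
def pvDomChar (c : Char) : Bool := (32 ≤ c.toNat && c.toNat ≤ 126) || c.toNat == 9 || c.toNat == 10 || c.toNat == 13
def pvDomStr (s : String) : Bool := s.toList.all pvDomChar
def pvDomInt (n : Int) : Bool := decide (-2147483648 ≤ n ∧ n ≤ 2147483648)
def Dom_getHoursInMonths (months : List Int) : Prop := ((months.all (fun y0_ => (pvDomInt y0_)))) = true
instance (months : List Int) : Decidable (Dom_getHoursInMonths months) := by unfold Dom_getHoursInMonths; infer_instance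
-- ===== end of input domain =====

-- B replaces A's two nested passes (day list per month, then 24 hours per day) by one running-sum
-- table of month start-days and a single contiguous hour range per month (objective: simpler).


-- ===== PORT A =====
def pvDaysPerMonth : List (Int × Int) :=
  [(1,31),(2,28),(3,31),(4,30),(5,31),(6,30),(7,31),(8,31),(9,30),(10,31),(11,30),(12,31)]

-- helper getFirstDayInMonthsAsDayInYear: loop over range(len(daysPerMonth)) carrying the
-- growing list and daysPriorMonth (the dummy initial 0 is never read, idx==0 takes the other branch)
def pvGetFirstDayInMonthsAsDayInYear (daysPerMonth : List (Int × Int)) : List Int :=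
  ((PySem.List.pyRange 0 (daysPerMonth.length : Int) 1).foldl
    (fun (st : List Int × Int) idx =>
      let acc := if idx == 0 then st.1 ++ [0]
                 else st.1 ++ [(PySem.List.pyGet? st.1 (idx - 1)).getD 0 + st.2]
      (acc, ((PySem.List.pyGet? daysPerMonth idx).getD (0, 0)).2))
    ([], 0)).1

def getHoursInMonths (months : List Int) : List Int :=
  let daysPerMonth := pvDaysPerMonth
  let firstDayInMonthsAsDayInYear := pvGetFirstDayInMonthsAsDayInYear daysPerMonth
  let daysInMonths := months.foldl
    (fun acc month =>
      let firstDayInMonth := (PySem.List.pyGet? firstDayInMonthsAsDayInYear (month - 1)).getD 0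
      let dpm := ((PySem.List.pyGet? daysPerMonth (month - 1)).getD (0, 0)).2
      acc ++ PySem.List.pyRange firstDayInMonth (firstDayInMonth + dpm) 1) []
  daysInMonths.foldl
    (fun acc day => acc ++ (PySem.List.pyRange (day * 24) ((day + 1) * 24) 1).map (· + 1)) []

-- ===== PORT B =====
def pvAltDays : List Int := [31, 28, 31, 30, 31, 30, 31, 31, 30, 31, 30, 31]

-- running cumulative sum: starts[i] = first day-of-year of month i+1
def pvAltStarts : List Int :=
  (pvAltDays.foldl (fun (st : List Int × Int) d => (st.1 ++ [st.2], st.2 + d)) ([], 0)).1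

def getHoursInMonths_alt (months : List Int) : List Int :=
  months.foldl
    (fun acc m =>
      let first := (PySem.List.pyGet? pvAltStarts (m - 1)).getD 0
      let d := (PySem.List.pyGet? pvAltDays (m - 1)).getD 0
      acc ++ PySem.List.pyRange (first * 24 + 1) ((first + d) * 24 + 1) 1) []

-- ===== PRECONDITION & SPEC =====
-- Pre_ excludes exactly the months on which A's list indexing raises IndexError (m < -11 or m > 12)
def Pre_getHoursInMonths (months : List Int) : Prop :=
  ∀ m ∈ months, -11 ≤ m ∧ m ≤ 12
instance (months : List Int) : Decidable (Pre_getHoursInMonths months) := by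
  unfold Pre_getHoursInMonths; infer_instance
def pvWitness_getHoursInMonths : List Int := [2]

def Spec_getHoursInMonths (months : List Int) (out : List Int) : Prop := out = getHoursInMonths_alt months
instance (months : List Int) (out : List Int) : Decidable (Spec_getHoursInMonths months out) := by unfold Spec_getHoursInMonths; infer_instance

-- ===== CLAIM (what is proved, stated in full; the proofs are below) =====
def Claim_equal_getHoursInMonths : Prop := ∀ (months : List Int), Dom_getHoursInMonths months → Pre_getHoursInMonths months → Spec_getHoursInMonths months (getHoursInMonths months)

-- ===== LEMMAS AND PROOFS =====

-- per-month contribution of A (day block, then hour expansion) and of B (one hour range)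
def pvBlockA (m : Int) : List Int :=
  (PySem.List.pyRange ((PySem.List.pyGet? (pvGetFirstDayInMonthsAsDayInYear pvDaysPerMonth) (m - 1)).getD 0)
     (((PySem.List.pyGet? (pvGetFirstDayInMonthsAsDayInYear pvDaysPerMonth) (m - 1)).getD 0)
       + ((PySem.List.pyGet? pvDaysPerMonth (m - 1)).getD (0, 0)).2) 1).flatMap
    (fun day => (PySem.List.pyRange (day * 24) ((day + 1) * 24) 1).map (· + 1))

def pvBlockB (m : Int) : List Int :=
  PySem.List.pyRange (((PySem.List.pyGet? pvAltStarts (m - 1)).getD 0) * 24 + 1)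
    ((((PySem.List.pyGet? pvAltStarts (m - 1)).getD 0) + (PySem.List.pyGet? pvAltDays (m - 1)).getD 0) * 24 + 1) 1

theorem pvA_flatMap (months : List Int) :
    getHoursInMonths months = months.flatMap pvBlockA := by
  show (months.foldl _ []).foldl _ [] = _
  rw [PySem.List.foldl_append_eq_flatMap, PySem.List.foldl_append_eq_flatMap]
  simp only [List.nil_append, List.flatMap_assoc]
  rfl

theorem pvB_flatMap (months : List Int) :
    getHoursInMonths_alt months = months.flatMap pvBlockB := by
  show months.foldl _ [] = _
  rw [PySem.List.foldl_append_eq_flatMap]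
  simp only [List.nil_append]
  rfl

set_option maxRecDepth 40000 in
theorem pvBlock_eq (m : Int) (h1 : -11 ≤ m) (h2 : m ≤ 12) : pvBlockA m = pvBlockB m := by
  interval_cases m <;> decide

-- ===== VERDICT (by name: the statement is the Claim_ definition above) =====
theorem getHoursInMonths_spec : Claim_equal_getHoursInMonths := by
  intro months hdom hpre
  clear hdom
  unfold Spec_getHoursInMonths
  rw [pvA_flatMap, pvB_flatMap]
  induction months with
  | nil => rfl
  | cons m ms ih =>
    have hm := hpre m (List.mem_cons_self ..)
    simp only [List.flatMap_cons]
    rw [pvBlock_eq m hm.1 hm.2, ih (fun x hx => hpre x (List.mem_cons_of_mem _ hx))]
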